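-- pv_equiv track=rewrite | github.com/rec/doks | doks/rst/rst.py | section_characters
-- ===== SOURCE A (Python) =====
-- SECTIONS = '-=~_+*#`\':<>^"'
--
-- def section_characters(lines):
--     sections = []
--     pline = ''
--     for line in lines:
--         if pline and len(line) >= len(pline):
--             s = line[0]
--             if s in SECTIONS and s not in sections and len(set(line)) == 1:
--                 sections.append(s)
--         pline = line
--
--     missing = [s for s in SECTIONS if s not in sections]
--     return ''.join(sections + missing)
-- ===== SOURCE B (Python) =====
-- SECTIONS = '-=~_+*#`\':<>^"'
--
-- def section_characters(lines):
--     # One pass over consecutive line pairs recording each qualifying section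
--     # char's rank of first appearance, then one stable sort of SECTIONS by
--     # that rank (unseen chars share the sentinel rank and keep their order).
--     order = {}
--     for prev, cur in zip(lines, lines[1:]):
--         if prev and len(cur) >= len(prev) and cur[0] in SECTIONS and len(set(cur)) == 1:
--             order.setdefault(cur[0], len(order))
--     return ''.join(sorted(SECTIONS, key=lambda c: order.get(c, len(SECTIONS))))
-- ===== Notes on version B (the rewrite author's own statement) =====
-- stated objective: alternative
-- what changed: B iterates over zip(lines, lines[1:]) recording each qualifying section char's first-appearance rank in a dict via setdefault, then produces the answer with one stable sort of SECTIONS keyed by that rank (sentinel = len(SECTIONS)), replacing A's pline-state loop with an 'append if unseen' list plus a second 'append the missing leftovers' pass.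
import Mathlib
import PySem

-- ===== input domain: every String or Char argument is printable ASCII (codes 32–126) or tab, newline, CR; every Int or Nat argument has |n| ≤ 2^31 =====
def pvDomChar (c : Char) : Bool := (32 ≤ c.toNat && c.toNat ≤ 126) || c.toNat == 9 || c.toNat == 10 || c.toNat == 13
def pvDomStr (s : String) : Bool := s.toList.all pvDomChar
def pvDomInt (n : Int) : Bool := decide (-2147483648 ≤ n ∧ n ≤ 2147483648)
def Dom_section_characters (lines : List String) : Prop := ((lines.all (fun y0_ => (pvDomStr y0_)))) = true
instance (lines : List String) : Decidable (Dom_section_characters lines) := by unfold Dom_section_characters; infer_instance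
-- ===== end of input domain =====

-- B replaces A's "append new chars, then append the leftover SECTIONS chars" assembly by a
-- first-appearance rank table built over consecutive line pairs plus one stable sort of
-- SECTIONS keyed by that rank (objective: alternative decomposition, same cost).

-- SECTIONS = '-=~_+*#`\':<>^"'  (as its list of characters)
def pySECTIONS : List Char := ['-', '=', '~', '_', '+', '*', '#', '`', '\'', ':', '<', '>', '^', '"']

-- ===== PORT A =====
-- one iteration of A's loop; state = (sections, pline)
def aStep (st : List Char × String) (line : String) : List Char × String :=
  match st with
  | (sections, pline) =>
    if pline.toList ≠ [] ∧ line.toList.length ≥ pline.toList.length then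
      -- s = line[0]; in range whenever this branch runs (pline nonempty forces len(line) ≥ 1)
      let s := (PySem.Str.pyGet? line 0).getD ' '
      if s ∈ pySECTIONS ∧ s ∉ sections ∧ (PySem.Set.ofList line.toList).length = 1 then
        (sections ++ [s], line)
      else (sections, line)
    else (sections, line)

def section_characters (lines : List String) : String :=
  let r := lines.foldl aStep ([], "")
  let missing := pySECTIONS.filter (fun s => s ∉ r.1)
  String.mk (r.1 ++ missing)

-- ===== PORT B =====
-- one iteration of B's loop over zip(lines, lines[1:]); state = the rank dict
def bStep (d : PySem.Dict Char Int) (pr : String × String) : PySem.Dict Char Int :=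
  match pr with
  | (prev, cur) =>
    if prev.toList ≠ [] ∧ cur.toList.length ≥ prev.toList.length ∧
       ((PySem.Str.pyGet? cur 0).getD ' ') ∈ pySECTIONS ∧
       (PySem.Set.ofList cur.toList).length = 1 then
      d.setdefault ((PySem.Str.pyGet? cur 0).getD ' ') (d.size : Int)
    else d

def section_characters_alt (lines : List String) : String :=
  let order := (lines.zip lines.tail).foldl bStep PySem.Dict.empty
  String.mk (PySem.List.sorted pySECTIONS (fun c => order.getD c (pySECTIONS.length : Int)))

-- ===== PRECONDITION & SPEC =====
def Spec_section_characters (lines : List String) (out : String) : Prop := out = section_characters_alt lines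
instance (lines : List String) (out : String) : Decidable (Spec_section_characters lines out) := by unfold Spec_section_characters; infer_instance

-- ===== CLAIM (what is proved, stated in full; the proofs are below) =====
def Claim_equal_section_characters : Prop := ∀ (lines : List String), Dom_section_characters lines → Spec_section_characters lines (section_characters lines)

-- ===== LEMMAS AND PROOFS =====

-- the rank dict B builds, described from A's sections list: c ↦ its position in sec
def rankList : List Char → Nat → List (Char × Int)
  | [], _ => []
  | c :: t, i => (c, (i : Int)) :: rankList t (i + 1)

def mkd (sec : List Char) : PySem.Dict Char Int := PySem.Dict.mk (rankList sec 0)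

-- the lookup B's key function performs, as a recursive function on sec
def rankOf : List Char → Char → Nat → Int → Int
  | [], _, _, dflt => dflt
  | a :: t, c, i, dflt => if a = c then (i : Int) else rankOf t c (i + 1) dflt

lemma rankList_map_fst : ∀ (sec : List Char) (i : Nat), (rankList sec i).map Prod.fst = sec
  | [], _ => rfl
  | c :: t, i => by simp [rankList, rankList_map_fst t (i + 1)]

lemma rankList_length : ∀ (sec : List Char) (i : Nat), (rankList sec i).length = sec.length
  | [], _ => rfl
  | c :: t, i => by simp [rankList, rankList_length t (i + 1)]

lemma rankList_append_singleton : ∀ (sec : List Char) (c : Char) (i : Nat),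
    rankList (sec ++ [c]) i = rankList sec i ++ [(c, ((i + sec.length : Nat) : Int))] := by
  intro sec
  induction sec with
  | nil => intro c i; simp [rankList]
  | cons a t ih =>
    intro c i
    simp only [List.cons_append, rankList, ih, List.length_cons]
    have he : i + 1 + t.length = i + (t.length + 1) := by omega
    rw [he]

lemma keys_mk_rankList (sec : List Char) (i : Nat) :
    (PySem.Dict.mk (rankList sec i)).keys = sec := by
  simp only [PySem.Dict.keys, rankList_map_fst]

lemma getD_mk_rankList : ∀ (sec : List Char) (i : Nat) (c : Char) (M : Int),
    (PySem.Dict.mk (rankList sec i)).getD c M = rankOf sec c i M := by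
  intro sec
  induction sec with
  | nil => intro i c M; rfl
  | cons a t ih =>
    intro i c M
    rw [PySem.Dict.getD_eq_get?_getD, rankList, PySem.Dict.get?_mk_cons]
    by_cases h : a = c
    · simp [h, rankOf]
    · simp only [rankOf, beq_iff_eq, if_neg h, ← PySem.Dict.getD_eq_get?_getD, ih]

lemma rankOf_not_mem : ∀ (sec : List Char) (c : Char) (i : Nat) (M : Int),
    c ∉ sec → rankOf sec c i M = M := by
  intro sec
  induction sec with
  | nil => intro c i M _; rfl
  | cons a t ih =>
    intro c i M h
    simp only [List.mem_cons, not_or] at h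
    have hne : ¬ a = c := fun e : a = c => h.1 e.symm
    rw [rankOf, if_neg hne, ih c (i + 1) M h.2]

lemma rankOf_bounds : ∀ (sec : List Char) (c : Char) (i : Nat) (M : Int),
    c ∈ sec → (i : Int) ≤ rankOf sec c i M ∧ rankOf sec c i M < (i : Int) + sec.length := by
  intro sec
  induction sec with
  | nil => intro c i M h; cases h
  | cons a t ih =>
    intro c i M h
    by_cases e : a = c
    · simp only [rankOf, if_pos e, List.length_cons]
      constructor
      · exact le_refl _
      · push_cast; omega
    · have hc : c ∈ t := by
        rcases List.mem_cons.mp h with h' | h'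
        · exact absurd h'.symm e
        · exact h'
      have := ih c (i + 1) M hc
      simp only [rankOf, if_neg e, List.length_cons]
      push_cast at this ⊢
      omega

lemma rankOf_pairwise : ∀ (sec : List Char) (i : Nat) (M : Int), sec.Nodup →
    sec.Pairwise (fun a b => rankOf sec a i M < rankOf sec b i M) := by
  intro sec
  induction sec with
  | nil => intro i M _; exact List.Pairwise.nil
  | cons x t ih =>
    intro i M hn
    rw [List.nodup_cons] at hn
    rw [List.pairwise_cons]
    constructor
    · intro b hb
      have hbx : x ≠ b := fun e => hn.1 (e ▸ hb)
      have hlb := (rankOf_bounds t b (i + 1) M hb).1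
      simp only [rankOf, if_neg hbx]
      push_cast at hlb ⊢
      omega
    · have := ih (i + 1) M hn.2
      refine this.imp_of_mem ?_
      intro a b ha hb hab
      have hxa : x ≠ a := fun e => hn.1 (e ▸ ha)
      have hxb : x ≠ b := fun e => hn.1 (e ▸ hb)
      simpa only [rankOf, if_neg hxa, if_neg hxb] using hab

lemma setdefault_mkd_mem (sec : List Char) (c : Char) (v : Int) (h : c ∈ sec) :
    (mkd sec).setdefault c v = mkd sec := by
  have hk : (mkd sec).keys = sec := keys_mk_rankList sec 0
  apply PySem.Dict.setdefault_of_contains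
  rw [PySem.Dict.contains_eq_decide_mem_keys, hk]
  simpa using h

lemma setdefault_mkd_fresh (sec : List Char) (c : Char) (h : c ∉ sec) :
    (mkd sec).setdefault c ((mkd sec).size : Int) = mkd (sec ++ [c]) := by
  have hk : (mkd sec).keys = sec := keys_mk_rankList sec 0
  have hcont : (mkd sec).contains c = false := by
    rw [PySem.Dict.contains_eq_decide_mem_keys, hk]
    simpa using h
  rw [PySem.Dict.setdefault_of_not_contains _ _ hcont]
  apply PySem.Dict.ext
  rw [PySem.Dict.items_insert_of_not_contains _ _ hcont]
  show rankList sec 0 ++ [(c, ((mkd sec).size : Int))] = rankList (sec ++ [c]) 0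
  rw [rankList_append_singleton]
  have hsz : (mkd sec).size = 0 + sec.length := by
    show (rankList sec 0).length = 0 + sec.length
    rw [rankList_length]
    omega
  rw [hsz]

-- the two scans build matching data: B's dict is A's sections list with ranks
lemma scan : ∀ (rest : List String) (p : String) (sec : List Char), sec.Nodup →
    (∀ c ∈ sec, c ∈ pySECTIONS) →
    ((p :: rest).zip rest).foldl bStep (mkd sec) = mkd (rest.foldl aStep (sec, p)).1 ∧
      (rest.foldl aStep (sec, p)).1.Nodup ∧ (∀ c ∈ (rest.foldl aStep (sec, p)).1, c ∈ pySECTIONS) := by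
  intro rest
  induction rest with
  | nil => intro p sec hn hs; exact ⟨rfl, hn, hs⟩
  | cons l t ih =>
    intro p sec hn hs
    rw [List.zip_cons_cons, List.foldl_cons, List.foldl_cons]
    by_cases h1 : p.toList ≠ [] ∧ l.toList.length ≥ p.toList.length
    · by_cases h2 : ((PySem.Str.pyGet? l 0).getD ' ') ∈ pySECTIONS ∧
          (PySem.Set.ofList l.toList).length = 1
      · by_cases h3 : ((PySem.Str.pyGet? l 0).getD ' ') ∈ sec
        · have ha : aStep (sec, p) l = (sec, l) := by
            simp only [aStep]
            rw [if_pos h1, if_neg (fun hc => hc.2.1 h3)]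
          have hb : bStep (mkd sec) (p, l) = mkd sec := by
            simp only [bStep]
            rw [if_pos ⟨h1.1, h1.2, h2.1, h2.2⟩]
            exact setdefault_mkd_mem _ _ _ h3
          rw [ha, hb]
          exact ih l sec hn hs
        · have ha : aStep (sec, p) l = (sec ++ [(PySem.Str.pyGet? l 0).getD ' '], l) := by
            simp only [aStep]
            rw [if_pos h1, if_pos ⟨h2.1, h3, h2.2⟩]
          have hb : bStep (mkd sec) (p, l) = mkd (sec ++ [(PySem.Str.pyGet? l 0).getD ' ']) := by
            simp only [bStep]
            rw [if_pos ⟨h1.1, h1.2, h2.1, h2.2⟩]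
            exact setdefault_mkd_fresh _ _ h3
          rw [ha, hb]
          refine ih l (sec ++ [(PySem.Str.pyGet? l 0).getD ' ']) ?_ ?_
          · rw [List.nodup_append]
            refine ⟨hn, List.nodup_singleton _, ?_⟩
            intro a ha b hb hab
            exact h3 ((hab.trans (List.mem_singleton.mp hb)) ▸ ha)
          · intro c hc
            rcases List.mem_append.mp hc with h' | h'
            · exact hs c h'
            · rw [List.mem_singleton.mp h']
              exact h2.1
      · have ha : aStep (sec, p) l = (sec, l) := by
          simp only [aStep]
          rw [if_pos h1, if_neg (fun hc => h2 ⟨hc.1, hc.2.2⟩)]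
        have hb : bStep (mkd sec) (p, l) = mkd sec := by
          simp only [bStep]
          rw [if_neg (fun hc => h2 ⟨hc.2.2.1, hc.2.2.2⟩)]
        rw [ha, hb]
        exact ih l sec hn hs
    · have ha : aStep (sec, p) l = (sec, l) := by
        simp only [aStep]
        rw [if_neg h1]
      have hb : bStep (mkd sec) (p, l) = mkd sec := by
        simp only [bStep]
        rw [if_neg (fun hc => h1 ⟨hc.1, hc.2.1⟩)]
      rw [ha, hb]
      exact ih l sec hn hs

lemma dict_eq (lines : List String) :
    (lines.zip lines.tail).foldl bStep PySem.Dict.empty = mkd (lines.foldl aStep ([], "")).1 ∧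
      (lines.foldl aStep ([], "")).1.Nodup ∧ (∀ c ∈ (lines.foldl aStep ([], "")).1, c ∈ pySECTIONS) := by
  have hemp : (PySem.Dict.empty : PySem.Dict Char Int) = mkd [] := rfl
  cases lines with
  | nil => exact ⟨rfl, List.nodup_nil, by intro c hc; cases hc⟩
  | cons l rest =>
    have h0 : aStep ([], "") l = ([], l) := by
      simp only [aStep]
      rw [if_neg (by intro hc; exact hc.1 rfl)]
    rw [List.foldl_cons, h0, hemp]
    exact scan rest l [] List.nodup_nil (by intro c hc; cases hc)

-- stability of the insertion sort: inserting a key-M element appends, inserting a sec element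
-- lands at its sec position
lemma insertBy_nil (b : Char → Char → Bool) (x : Char) :
    PySem.List.insertBy b x ([] : List Char) = [x] := rfl

lemma insertBy_cons (b : Char → Char → Bool) (x y : Char) (ys : List Char) :
    PySem.List.insertBy b x (y :: ys) =
      if b x y then x :: y :: ys else y :: PySem.List.insertBy b x ys := rfl

lemma insert_mid (k : Char → Int) (M : Int) :
    ∀ (sec : List Char), sec.Pairwise (fun a b => k a < k b) → (∀ c ∈ sec, k c < M) →
    ∀ (m : List Char), (∀ y ∈ m, k y = M) →
    ∀ (x : Char) (p : Char → Bool), x ∈ sec → p x = false →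
      PySem.List.insertBy (fun a b => decide (k a < k b)) x (sec.filter p ++ m) =
        sec.filter (fun c => p c || c == x) ++ m := by
  intro sec
  induction sec with
  | nil => intro _ _ _ _ x p hx _; cases hx
  | cons a t ih =>
    intro hpw hkM m hm x p hx hpx
    rw [List.pairwise_cons] at hpw
    by_cases hxa : x = a
    · subst hxa
      have hat : x ∉ t := fun hmem => lt_irrefl _ (hpw.1 x hmem)
      have hfa : t.filter (fun c => p c || c == x) = t.filter p := by
        apply List.filter_congr
        intro c hc
        have : ¬ c = x := fun e => hat (e ▸ hc)
        simp [this]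
      have hhd : ∀ y ∈ t.filter p ++ m, decide (k x < k y) = true := by
        intro y hy
        rcases List.mem_append.mp hy with h' | h'
        · exact decide_eq_true (hpw.1 y (List.mem_of_mem_filter h'))
        · have := hm y h'
          have hkx := hkM x (List.mem_cons_self)
          exact decide_eq_true (by omega)
      rw [List.filter_cons_of_neg (by simp [hpx]), List.filter_cons_of_pos (by simp), hfa,
        List.cons_append]
      cases hl : t.filter p ++ m with
      | nil => exact insertBy_nil _ _
      | cons y ys =>
        have hy := hhd y (by rw [hl]; exact List.mem_cons_self)
        rw [insertBy_cons, if_pos hy]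
    · have hxt : x ∈ t := by
        rcases List.mem_cons.mp hx with h' | h'
        · exact absurd h' hxa
        · exact h'
      have hka : k a < k x := hpw.1 x hxt
      have ihr := ih hpw.2 (fun c hc => hkM c (List.mem_cons_of_mem a hc)) m hm x p hxt hpx
      by_cases hpa : p a = true
      · rw [List.filter_cons_of_pos hpa, List.filter_cons_of_pos (by simp [hpa])]
        simp only [List.cons_append]
        rw [insertBy_cons, if_neg (by simp only [decide_eq_true_eq]; omega), ihr]
      · rw [List.filter_cons_of_neg hpa, List.filter_cons_of_neg (by simp at hpa ⊢; exact ⟨hpa, fun e => hxa e.symm⟩), ihr]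

lemma fold_ins (k : Char → Int) (M : Int) (sec : List Char)
    (hpw : sec.Pairwise (fun a b => k a < k b)) (hkM : ∀ c ∈ sec, k c < M) :
    ∀ (xs : List Char), xs.Nodup → (∀ c ∈ xs, c ∉ sec → k c = M) →
    ∀ (p : Char → Bool) (m : List Char), (∀ y ∈ m, k y = M) → (∀ c ∈ xs, c ∈ sec → p c = false) →
      xs.foldl (fun acc x => PySem.List.insertBy (fun a b => decide (k a < k b)) x acc)
          (sec.filter p ++ m) =
        sec.filter (fun c => p c || xs.contains c) ++ (m ++ xs.filter (fun c => !(sec.contains c))) := by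
  intro xs
  induction xs with
  | nil =>
    intro _ _ p m _ _
    simp
  | cons x xs' ih =>
    intro hnd hout p m hm hp
    rw [List.nodup_cons] at hnd
    rw [List.foldl_cons]
    by_cases hx : x ∈ sec
    · rw [insert_mid k M sec hpw hkM m hm x p hx (hp x List.mem_cons_self hx)]
      rw [ih hnd.2 (fun c hc => hout c (List.mem_cons_of_mem x hc))
          (fun c => p c || c == x) m hm ?_]
      · congr 1
        · apply List.filter_congr
          intro c hc
          by_cases e : c = x
          · subst e; simp
          · have hbe : (c == x) = false := beq_eq_false_iff_ne.mpr e
            simp [hbe, e]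
        · congr 1
          rw [List.filter_cons_of_neg (by simp [hx])]
      · intro c hc hcs
        have hcx : ¬ c = x := fun e => hnd.1 (e ▸ hc)
        simp [hp c (List.mem_cons_of_mem x hc) hcs, hcx]
    · have hkx : k x = M := hout x List.mem_cons_self hx
      have happ : PySem.List.insertBy (fun a b => decide (k a < k b)) x (sec.filter p ++ m) =
          (sec.filter p ++ m) ++ [x] := by
        apply PySem.List.insertBy_of_forall_not_before
        intro y hy
        rcases List.mem_append.mp hy with h' | h'
        · have := hkM y (List.mem_of_mem_filter h')
          simp only [decide_eq_false_iff_not]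
          omega
        · have := hm y h'
          simp only [decide_eq_false_iff_not]
          omega
      rw [happ, List.append_assoc]
      rw [ih hnd.2 (fun c hc => hout c (List.mem_cons_of_mem x hc)) p (m ++ [x]) ?_
          (fun c hc hcs => hp c (List.mem_cons_of_mem x hc) hcs)]
      · congr 1
        · apply List.filter_congr
          intro c hc
          have hcx : ¬ c = x := fun e => hx (e ▸ hc)
          simp [hcx]
        · rw [List.append_assoc]
          congr 1
          rw [List.filter_cons_of_pos (by simp [hx])]
          simp
      · intro y hy
        rcases List.mem_append.mp hy with h' | h'
        · exact hm y h'
        · simp at h'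
          rw [h']
          exact hkx

lemma sec_length_le (sec : List Char) (hn : sec.Nodup) (hsub : ∀ c ∈ sec, c ∈ pySECTIONS) :
    sec.length ≤ pySECTIONS.length := by
  calc sec.length = sec.toFinset.card := (List.toFinset_card_of_nodup hn).symm
    _ ≤ pySECTIONS.toFinset.card := by
        apply Finset.card_le_card
        intro c hc
        rw [List.mem_toFinset] at hc ⊢
        exact hsub c hc
    _ ≤ pySECTIONS.length := List.toFinset_card_le _

lemma sorted_eq (sec : List Char) (hn : sec.Nodup) (hsub : ∀ c ∈ sec, c ∈ pySECTIONS) :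
    PySem.List.sorted pySECTIONS (fun c => (mkd sec).getD c (pySECTIONS.length : Int)) =
      sec ++ pySECTIONS.filter (fun s => s ∉ sec) := by
  have hk : ∀ c, (mkd sec).getD c ((pySECTIONS.length : Nat) : Int) =
      rankOf sec c 0 ((pySECTIONS.length : Nat) : Int) := fun c => getD_mk_rankList sec 0 c _
  have hpw : sec.Pairwise (fun a b =>
      (mkd sec).getD a (pySECTIONS.length : Int) < (mkd sec).getD b (pySECTIONS.length : Int)) := by
    refine (rankOf_pairwise sec 0 (pySECTIONS.length : Int) hn).imp ?_
    intro a b h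
    rw [hk, hk]
    exact h
  have hkM : ∀ c ∈ sec, (mkd sec).getD c (pySECTIONS.length : Int) < (pySECTIONS.length : Int) := by
    intro c hc
    rw [hk]
    have hb := (rankOf_bounds sec c 0 (pySECTIONS.length : Int) hc).2
    have hl := sec_length_le sec hn hsub
    push_cast at hb ⊢
    omega
  have hfi := fold_ins (fun c => (mkd sec).getD c (pySECTIONS.length : Int))
      (pySECTIONS.length : Int) sec hpw hkM pySECTIONS (by decide)
      (fun c _ hcs => (hk c).trans (rankOf_not_mem sec c 0 _ hcs))
      (fun _ => false) [] (by intro y hy; cases hy) (fun _ _ _ => rfl)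
  have hacc : sec.filter (fun _ => false) ++ ([] : List Char) = [] := by simp
  rw [hacc] at hfi
  rw [PySem.List.sorted_eq_foldl_insertBy, hfi]
  have h1 : sec.filter (fun c => false || pySECTIONS.contains c) = sec := by
    apply List.filter_eq_self.mpr
    intro c hc
    simp [hsub c hc]
  have h2 : pySECTIONS.filter (fun c => !(sec.contains c)) =
      pySECTIONS.filter (fun s => decide (s ∉ sec)) := by
    apply List.filter_congr
    intro c _
    simp
  rw [h1, h2]
  simp

-- ===== VERDICT (by name: the statement is the Claim_ definition above) =====
theorem section_characters_spec : Claim_equal_section_characters := by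
  intro lines _
  obtain ⟨hd, hn, hsub⟩ := dict_eq lines
  show String.mk ((lines.foldl aStep ([], "")).1 ++
      pySECTIONS.filter (fun s => decide (s ∉ (lines.foldl aStep ([], "")).1))) =
    String.mk (PySem.List.sorted pySECTIONS
      (fun c => ((lines.zip lines.tail).foldl bStep PySem.Dict.empty).getD c (pySECTIONS.length : Int)))
  rw [hd, sorted_eq _ hn hsub]
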